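-- pv_equiv track=rewrite | github.com/ayush3298/geekforgeeks_practice | Closest Palindrome.py | subMiddle
-- ===== SOURCE A (Python) =====
-- def subMiddle(array, i, j):
--     if array[i] == 0:
--         recurse = True
--         array[i] = array[j] = 9
--     else:
--         recurse = False
--         array[i] = array[j] = array[i] - 1
--
--     if recurse:
--         return subMiddle(array, i - 1, j + 1)
--     else:
--         return array
-- ===== SOURCE B (Python) =====
-- def subMiddle(array, i, j):
--     while array[i] == 0:
--         array[i] = array[j] = 9
--         i -= 1
--         j += 1
--     array[i] = array[j] = array[i] - 1
--     return array
-- ===== Notes on version B (the rewrite author's own statement) =====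
-- stated objective: simpler
-- what changed: The borrow propagation is rewritten from a recursive call per zero digit into a single explicit while loop that moves the two indices iteratively; the mutations and return value are identical.
import Mathlib
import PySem

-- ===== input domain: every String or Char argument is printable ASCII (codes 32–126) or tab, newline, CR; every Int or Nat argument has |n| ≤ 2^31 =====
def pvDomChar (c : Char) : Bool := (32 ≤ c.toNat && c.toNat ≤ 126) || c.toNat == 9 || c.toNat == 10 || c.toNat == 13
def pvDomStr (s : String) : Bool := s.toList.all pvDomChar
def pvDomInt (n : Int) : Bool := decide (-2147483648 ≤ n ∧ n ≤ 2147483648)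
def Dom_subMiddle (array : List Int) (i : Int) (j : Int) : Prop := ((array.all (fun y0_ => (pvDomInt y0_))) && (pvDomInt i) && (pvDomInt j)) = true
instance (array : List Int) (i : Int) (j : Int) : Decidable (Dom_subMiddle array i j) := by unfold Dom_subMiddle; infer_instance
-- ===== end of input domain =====

-- B replaces A's per-digit recursion by one explicit while loop over the same two moving indices (simpler: no call stack); return values proved equal wherever A returns.


-- ===== PORT A =====
-- A's recursion, fuelled for totality: the recursion provably stops within array.length + 1
-- reads on EVERY input (see stop_all below), so the fuel never runs out; where Python raises
-- IndexError (PySem.List.pyGet? = none) the port returns the current array — outside Pre_.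
def subMiddleGo : Nat → List Int → Int → Int → List Int
  | 0, array, _, _ => array
  | fuel+1, array, i, j =>
    match PySem.List.pyGet? array i with
    | none => array            -- Python: IndexError (outside Pre_)
    | some v =>
      if v = 0 then
        -- recurse = True; array[i] = array[j] = 9; return subMiddle(array, i-1, j+1)
        subMiddleGo fuel (PySem.List.pySetD (PySem.List.pySetD array i 9) j 9) (i - 1) (j + 1)
      else
        -- recurse = False; array[i] = array[j] = array[i] - 1; return array
        PySem.List.pySetD (PySem.List.pySetD array i (v - 1)) j (v - 1)

def subMiddle (array : List Int) (i : Int) (j : Int) : List Int :=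
  subMiddleGo (array.length + 2) array i j

-- ===== PORT B =====
-- B's while loop: carries the mutable state (array, i, j); same fuel bound for totality.
def subMiddleLoop : Nat → List Int → Int → Int → List Int × Int × Int
  | 0, a, i, j => (a, i, j)
  | fuel+1, a, i, j =>
    match PySem.List.pyGet? a i with
    | none => (a, i, j)        -- Python: IndexError (outside Pre_)
    | some v =>
      if v = 0 then
        subMiddleLoop fuel (PySem.List.pySetD (PySem.List.pySetD a i 9) j 9) (i - 1) (j + 1)
      else (a, i, j)

def subMiddle_alt (array : List Int) (i : Int) (j : Int) : List Int :=
  let s := subMiddleLoop (array.length + 1) array i j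
  match PySem.List.pyGet? s.1 s.2.1 with
  | none => s.1
  | some v => PySem.List.pySetD (PySem.List.pySetD s.1 s.2.1 (v - 1)) s.2.2 (v - 1)

-- ===== PRECONDITION & SPEC =====
-- Python's index wraparound: the cell an in-range index x denotes, as an Int.
def pvWrapIdx (n : ℕ) (x : Int) : Int := if x < 0 then x + n else x
-- x is a valid Python index for a list of length n.
def pvWrapOk (n : ℕ) (x : Int) : Bool := decide (-(n : Int) ≤ x ∧ x < (n : Int))
-- The read of step m (all steps before m having been borrow steps that wrote 9s at cells
-- pvWrapIdx (i - m') and pvWrapIdx (j + m'), m' < m) yields 0.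
def pvReadZero (a : List Int) (i j : Int) (m : ℕ) : Bool :=
  (a.getD (pvWrapIdx a.length (i - m)).toNat 0 == 0) &&
  (List.range m).all (fun m' =>
    (pvWrapIdx a.length (i - m') != pvWrapIdx a.length (i - m)) &&
    (pvWrapIdx a.length (j + m') != pvWrapIdx a.length (i - m)))
-- Pre_ holds exactly when Python's subMiddle returns normally (raises no IndexError): some
-- step m (always ≤ len(array)) has every earlier step a fully in-range borrow step reading 0,
-- both indices of step m in range, and the read of step m nonzero.
def Pre_subMiddle (array : List Int) (i : Int) (j : Int) : Prop :=
  ∃ m ∈ List.range (array.length + 1),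
    ((List.range m).all (fun m' =>
        pvWrapOk array.length (i - m') && pvWrapOk array.length (j + m') &&
        pvReadZero array i j m') = true) ∧
    pvWrapOk array.length (i - m) = true ∧ pvWrapOk array.length (j + m) = true ∧
    pvReadZero array i j m = false
instance (array : List Int) (i : Int) (j : Int) : Decidable (Pre_subMiddle array i j) := by
  unfold Pre_subMiddle; infer_instance

def pvWitness_subMiddle : List Int × Int × Int := ([0, 1, 2, 0], 1, 2)

def Spec_subMiddle (array : List Int) (i : Int) (j : Int) (out : List Int) : Prop := out = subMiddle_alt array i j
instance (array : List Int) (i : Int) (j : Int) (out : List Int) : Decidable (Spec_subMiddle array i j out) := by unfold Spec_subMiddle; infer_instance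

-- ===== CLAIM (what is proved, stated in full; the proofs are below) =====
def Claim_equal_subMiddle : Prop := ∀ (array : List Int) (i : Int) (j : Int), Dom_subMiddle array i j → Pre_subMiddle array i j → Spec_subMiddle array i j (subMiddle array i j)

-- ===== LEMMAS AND PROOFS =====
-- The two ports are in fact equal on EVERY input (total_eq below); the Pre_ hypothesis of the
-- claim is only there to mark where the Python programs themselves return without raising.

-- 'The loop state (a, i, j) stops (read missing or nonzero) within f borrow steps.'
def StopF : Nat → List Int → Int → Int → Bool
  | 0, a, i, _ => decide (PySem.List.pyGet? a i ≠ some 0)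
  | f+1, a, i, j =>
    match PySem.List.pyGet? a i with
    | none => true
    | some v =>
      if v = 0 then StopF f (PySem.List.pySetD (PySem.List.pySetD a i 9) j 9) (i - 1) (j + 1)
      else true

theorem getD_ne_lt_length (a : List Int) (c : ℕ) (h : a.getD c 0 ≠ 0) : c < a.length := by
  by_contra hc
  rw [List.getD_eq_getElem?_getD, List.getElem?_eq_none (by omega)] at h
  exact h rfl

-- a write (to any index, in range or not) preserves 'cell c is nonzero' when it writes 9
theorem getD_set_nonzero (a : List Int) (k c : ℕ) (h : a.getD c 0 ≠ 0) :
    (a.set k 9).getD c 0 ≠ 0 := by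
  have hc := getD_ne_lt_length a c h
  rw [List.getD_eq_getElem?_getD, List.getElem?_set]
  split_ifs with h1 h2
  · simp
  · omega
  · rw [← List.getD_eq_getElem?_getD]; exact h

-- a write (to any index, in range or not) preserves 'cell c is nonzero' when it writes 9
theorem getD_pySetD_nine (a : List Int) (p : Int) (c : ℕ) (h : a.getD c 0 ≠ 0) :
    (PySem.List.pySetD a p 9).getD c 0 ≠ 0 := by
  unfold PySem.List.pySetD PySem.List.pySet? PySem.List.pyIdx?
  split_ifs with h1 h2 h3 <;>
    simp only [Option.map_some, Option.map_none, Option.getD_some, Option.getD_none]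
  · exact getD_set_nonzero a _ c h
  · exact h
  · exact getD_set_nonzero a _ c h
  · exact h

theorem pyGet?_nonneg' (a : List Int) (i : Int) (h0 : 0 ≤ i) (h1 : i < a.length) :
    PySem.List.pyGet? a i = some (a.getD i.toNat 0) := by
  have hk : i.toNat < a.length := by omega
  rw [PySem.List.pyGet?_of_nonneg a h0]
  simp [List.getElem?_eq_getElem hk, List.getD_eq_getElem?_getD]

theorem pyGet?_neg' (a : List Int) (i : Int) (h0 : -(a.length : Int) ≤ i) (h1 : i < 0) :
    PySem.List.pyGet? a i = some (a.getD (i + a.length).toNat 0) := by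
  obtain ⟨k, rfl⟩ : ∃ k : ℕ, i = -(k : Int) := ⟨(-i).toNat, by omega⟩
  have hpos : 0 < k := by omega
  have hle : k ≤ a.length := by omega
  have hidx : (-(k : Int) + (a.length : Int)).toNat = a.length - k := by omega
  have hk : a.length - k < a.length := by omega
  rw [hidx, PySem.List.pyGet?_neg_natCast a k hpos hle, List.getElem?_eq_getElem hk,
    List.getD_eq_getElem?_getD, List.getElem?_eq_getElem hk]
  simp

-- evaluating Python's read at an in-range index
theorem pyGet?_wrap (a : List Int) (i : Int) (h0 : -(a.length : Int) ≤ i) (h1 : i < a.length) :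
    PySem.List.pyGet? a i = some (a.getD (if i < 0 then i + a.length else i).toNat 0) := by
  by_cases hi : i < 0
  · rw [if_pos hi]; exact pyGet?_neg' a i h0 hi
  · rw [if_neg hi]; exact pyGet?_nonneg' a i (by omega) h1

-- setting an in-range index writes exactly the wrapped cell
theorem pySetD_wrap (a : List Int) (i : Int) (v : Int) (h0 : -(a.length : Int) ≤ i) (h1 : i < a.length) :
    PySem.List.pySetD a i v = a.set (if i < 0 then i + a.length else i).toNat v := by
  by_cases hi : i < 0
  · rw [if_pos hi]
    unfold PySem.List.pySetD PySem.List.pySet? PySem.List.pyIdx?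
    rw [if_neg (by omega), if_pos (by omega)]
    simp only [Option.map_some, Option.getD_some]
    congr 1
    omega
  · rw [if_neg hi, PySem.List.pySetD_of_nonneg a v (by omega)]

-- once some cell c holds a nonzero value, the borrow walk stops within any fuel ≥ T,
-- where after T more steps the read is cell c itself or falls off the left end
theorem aux_stop (T : ℕ) : ∀ (f : ℕ) (a : List Int) (i j : Int) (c : ℕ),
    a.getD c 0 ≠ 0 → T ≤ f →
    (i - T = (c : Int) ∨ i - T = (c : Int) - a.length ∨ i - (T : Int) < -(a.length : Int)) →
    StopF f a i j = true := by
  induction T with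
  | zero =>
    intro f a i j c h9 _ hR
    have hc := getD_ne_lt_length a c h9
    have h9' : ¬ a[c]?.getD 0 = 0 := by rw [← List.getD_eq_getElem?_getD]; exact h9
    rcases hR with hR | hR | hR
    · have hi : i = (c : Int) := by omega
      have hg : PySem.List.pyGet? a i = some (a.getD c 0) := by
        rw [pyGet?_wrap a i (by omega) (by omega)]
        have : (if i < 0 then i + (a.length : Int) else i).toNat = c := by omega
        rw [this]
      cases f <;> simp [StopF, hg, h9']
    · have hg : PySem.List.pyGet? a i = some (a.getD c 0) := by
        rw [pyGet?_wrap a i (by omega) (by omega)]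
        have : (if i < 0 then i + (a.length : Int) else i).toNat = c := by omega
        rw [this]
      cases f <;> simp [StopF, hg, h9']
    · have hg : PySem.List.pyGet? a i = none := by
        rw [PySem.List.pyGet?_eq_none_iff]
        unfold PySem.Raise.InRange
        omega
      cases f <;> simp [StopF, hg]
  | succ T ih =>
    intro f a i j c h9 hTf hR
    obtain ⟨f1, rfl⟩ : ∃ f1, f = f1 + 1 := ⟨f - 1, by omega⟩
    cases hg : PySem.List.pyGet? a i with
    | none => simp [StopF, hg]
    | some v =>
      by_cases hv : v = 0
      · have hlen : (PySem.List.pySetD (PySem.List.pySetD a i 9) j 9).length = a.length := by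
          simp [PySem.List.length_pySetD]
        have h9' := getD_pySetD_nine _ j c (getD_pySetD_nine a i c h9)
        have := ih f1 (PySem.List.pySetD (PySem.List.pySetD a i 9) j 9) (i - 1) (j + 1) c h9'
          (by omega) (by rw [hlen]; omega)
        simp [StopF, hg, hv, this]
      · simp [StopF, hg, hv]

-- the borrow walk ALWAYS stops within array.length + 1 reads: the first borrow step writes a
-- 9 into its own cell, which the walk re-reads after at most array.length further steps
-- unless it stops or falls off the left end before that.
theorem stop_all (a : List Int) (i j : Int) : StopF (a.length + 1) a i j = true := by
  cases hg : PySem.List.pyGet? a i with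
  | none => simp [StopF, hg]
  | some v =>
    by_cases hv : v = 0
    · have hin : -(a.length : Int) ≤ i ∧ i < a.length := by
        by_contra hc
        rw [show PySem.List.pyGet? a i = none from by
          rw [PySem.List.pyGet?_eq_none_iff]; unfold PySem.Raise.InRange; omega] at hg
        simp at hg
      have hn1 : 1 ≤ a.length := by omega
      have hc : (if i < 0 then i + (a.length : Int) else i).toNat < a.length := by omega
      have hset : (PySem.List.pySetD a i 9).getD (if i < 0 then i + (a.length : Int) else i).toNat 0 = 9 := by
        rw [pySetD_wrap a i 9 hin.1 hin.2, List.getD_eq_getElem?_getD,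
          List.getElem?_set_self (by simpa using hc)]
        simp
      have h9 : (PySem.List.pySetD (PySem.List.pySetD a i 9) j 9).getD
          (if i < 0 then i + (a.length : Int) else i).toNat 0 ≠ 0 :=
        getD_pySetD_nine _ j _ (by rw [hset]; norm_num)
      have hlen : (PySem.List.pySetD (PySem.List.pySetD a i 9) j 9).length = a.length := by
        simp [PySem.List.length_pySetD]
      have hstop := aux_stop (if 0 ≤ i then a.length - 1 else (i + a.length).toNat)
        a.length (PySem.List.pySetD (PySem.List.pySetD a i 9) j 9) (i - 1) (j + 1)
        (if i < 0 then i + (a.length : Int) else i).toNat h9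
        (by split_ifs <;> omega)
        (by rw [hlen]; split_ifs <;> omega)
      simp [StopF, hg, hv, hstop]
    · simp [StopF, hg, hv]

-- the bridge: whenever the walk stops within f steps, unrolling A's recursion f+1 times
-- equals running B's loop f times and then performing B's final assignment
theorem bridge (f : ℕ) : ∀ (a : List Int) (i j : Int), StopF f a i j = true →
    subMiddleGo (f + 1) a i j =
      (let s := subMiddleLoop f a i j
       match PySem.List.pyGet? s.1 s.2.1 with
       | none => s.1
       | some v => PySem.List.pySetD (PySem.List.pySetD s.1 s.2.1 (v - 1)) s.2.2 (v - 1)) := by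
  induction f with
  | zero =>
    intro a i j h
    rw [StopF, decide_eq_true_iff] at h
    cases hg : PySem.List.pyGet? a i with
    | none => simp [subMiddleGo, subMiddleLoop, hg]
    | some v =>
      have hv : ¬ v = 0 := by rintro rfl; exact h hg
      simp [subMiddleGo, subMiddleLoop, hg, hv]
  | succ f ih =>
    intro a i j h
    cases hg : PySem.List.pyGet? a i with
    | none => simp [subMiddleGo, subMiddleLoop, hg]
    | some v =>
      by_cases hv : v = 0
      · have h' : StopF f (PySem.List.pySetD (PySem.List.pySetD a i 9) j 9) (i - 1) (j + 1) = true := by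
          simpa [StopF, hg, hv] using h
        simp only [subMiddleGo, subMiddleLoop, hg, if_pos hv]
        simpa only [subMiddleGo] using ih _ _ _ h'
      · simp only [subMiddleGo, subMiddleLoop, hg, if_neg hv]

-- the two ports agree on every input
theorem total_eq (array : List Int) (i j : Int) : subMiddle array i j = subMiddle_alt array i j := by
  unfold subMiddle subMiddle_alt
  have h := bridge (array.length + 1) array i j (stop_all array i j)
  simpa using h

-- ===== VERDICT (by name: the statement is the Claim_ definition above) =====
theorem subMiddle_spec : Claim_equal_subMiddle := by
  intro array i j _ _
  exact total_eq array i j
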